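-- pv_equiv track=rewrite | github.com/ai-infra-curriculum/ai-infra-junior-engineer-solutions | modules/mod-009-monitoring-logging/exercise-01-observability-foundations/app/instrumentation/metrics.py | _normalize_endpoint
-- ===== SOURCE A (Python) =====
-- def _normalize_endpoint(endpoint: str) -> str:
--     """
--     Normalize endpoint path to avoid high cardinality.
--
--     Examples:
--         /predict/123 -> /predict/{id}
--         /users/abc-def -> /users/{id}
--
--     Args:
--         endpoint: Raw endpoint path
--
--     Returns:
--         Normalized endpoint path
--     """
--     # List of known endpoints
--     known_endpoints = {
--         "/predict",
--         "/health",
--         "/ready",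
--         "/metrics",
--         "/docs",
--         "/openapi.json",
--     }
--
--     # If exact match, return as-is
--     if endpoint in known_endpoints:
--         return endpoint
--
--     # If starts with known endpoint, normalize parameters
--     for known in known_endpoints:
--         if endpoint.startswith(known + "/"):
--             return f"{known}/{{id}}"
--
--     # Default: return first path segment only
--     parts = endpoint.split("/")
--     if len(parts) > 1:
--         return f"/{parts[1]}"
--
--     return endpoint
-- ===== SOURCE B (Python) =====
-- def _normalize_endpoint(endpoint: str) -> str:
--     """Normalize endpoint path to avoid high cardinality (single split, no prefix scan)."""
--     known_endpoints = {
--         "/predict",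
--         "/health",
--         "/ready",
--         "/metrics",
--         "/docs",
--         "/openapi.json",
--     }
--
--     if endpoint in known_endpoints:
--         return endpoint
--
--     parts = endpoint.split("/")
--     if len(parts) > 1:
--         base = f"/{parts[1]}"
--         if parts[0] == "" and base in known_endpoints and len(parts) > 2:
--             return f"{base}/{{id}}"
--         return base
--
--     return endpoint
-- ===== Notes on version B (the rewrite author's own statement) =====
-- stated objective: idiomatic
-- what changed: B replaces A's per-known-endpoint startswith prefix scan by one split of the endpoint and a single set lookup of the computed first segment ('/'+parts[1]), sharing the split with the default branch.
import Mathlib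
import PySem

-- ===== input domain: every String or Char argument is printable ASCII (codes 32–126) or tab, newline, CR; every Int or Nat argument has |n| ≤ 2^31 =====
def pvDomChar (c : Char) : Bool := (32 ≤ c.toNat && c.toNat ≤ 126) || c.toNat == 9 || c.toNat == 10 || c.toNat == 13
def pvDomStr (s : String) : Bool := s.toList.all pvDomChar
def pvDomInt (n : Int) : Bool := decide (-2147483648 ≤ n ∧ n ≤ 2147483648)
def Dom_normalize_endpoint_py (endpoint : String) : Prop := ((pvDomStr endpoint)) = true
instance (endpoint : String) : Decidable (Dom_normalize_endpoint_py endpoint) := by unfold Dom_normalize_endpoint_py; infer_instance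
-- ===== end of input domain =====

-- B replaces A's per-known-endpoint startswith scan by one split of the endpoint and a set lookup of '/'+parts[1]; same results, more idiomatic.

-- The Python set literal of known endpoints (distinct elements, in source order), shared by both ports.
def pvKnown : List (List Char) :=
  ["/predict".toList, "/health".toList, "/ready".toList,
   "/metrics".toList, "/docs".toList, "/openapi.json".toList]

-- ===== PORT A =====
-- Python's for-loop iterates a hash set; no known endpoint is a prefix of another, so at
-- most one 'known + "/"' can match and first-match over the listed order is exact.
def pvNormA (s : List Char) : List Char :=
  let known : PySem.Set (List Char) := PySem.Set.ofList pvKnown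
  if PySem.Set.contains known s then s
  else
    match known.find? (fun k => PySem.Chars.startswith s (k ++ ['/'])) with
    | some k => k ++ "/{id}".toList
    | none =>
      let parts := PySem.Chars.splitOn s ['/']
      if 1 < parts.length then '/' :: ((PySem.List.pyGet? parts 1).getD []) else s

def normalize_endpoint_py (endpoint : String) : String :=
  String.ofList (pvNormA endpoint.toList)

-- ===== PORT B =====
def pvNormB (s : List Char) : List Char :=
  let known : PySem.Set (List Char) := PySem.Set.ofList pvKnown
  if PySem.Set.contains known s then s
  else
    let parts := PySem.Chars.splitOn s ['/']
    if 1 < parts.length then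
      let base := '/' :: ((PySem.List.pyGet? parts 1).getD [])
      if (PySem.List.pyGet? parts 0).getD [] = [] ∧ PySem.Set.contains known base ∧ 2 < parts.length then
        base ++ "/{id}".toList
      else base
    else s

def normalize_endpoint_py_alt (endpoint : String) : String :=
  String.ofList (pvNormB endpoint.toList)

-- ===== PRECONDITION & SPEC =====
def Spec_normalize_endpoint_py (endpoint : String) (out : String) : Prop := out = normalize_endpoint_py_alt endpoint
instance (endpoint : String) (out : String) : Decidable (Spec_normalize_endpoint_py endpoint out) := by unfold Spec_normalize_endpoint_py; infer_instance

-- ===== CLAIM (what is proved, stated in full; the proofs are below) =====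
def Claim_equal_normalize_endpoint_py : Prop := ∀ (endpoint : String), Dom_normalize_endpoint_py endpoint → Spec_normalize_endpoint_py endpoint (normalize_endpoint_py endpoint)

-- ===== LEMMAS AND PROOFS =====

-- Structural model of Python's s.split("/") (single-character separator).
def split1 : List Char → List (List Char)
  | [] => [[]]
  | c :: t => if c = '/' then [] :: split1 t else (split1 t).modifyHead (c :: ·)

theorem split1_ne_nil (s : List Char) : split1 s ≠ [] := by
  cases s with
  | nil => simp [split1]
  | cons c t =>
    simp only [split1]
    split_ifs
    · simp
    · cases h : split1 t with
      | nil => exact absurd h (split1_ne_nil t)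
      | cons a b => simp

theorem splitOn_go_eq (fuel : Nat) (l cur : List Char) (acc : List (List Char))
    (h : l.length < fuel) :
    PySem.Chars.splitOn.go ['/'] fuel l cur acc
      = acc.reverse ++ (split1 l).modifyHead (cur.reverse ++ ·) := by
  induction fuel generalizing l cur acc with
  | zero => omega
  | succ f ih =>
    cases l with
    | nil => simp [PySem.Chars.splitOn.go, split1]
    | cons c rest =>
      rw [PySem.Chars.splitOn.go]
      by_cases hc : c = '/'
      · subst hc
        have hpre : List.isPrefixOf ['/'] ('/' :: rest) = true := by simp [List.isPrefixOf]
        simp only [hpre, if_true, List.length_singleton, List.drop_succ_cons, List.drop_zero]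
        rw [ih rest [] (cur.reverse :: acc) (by simpa using Nat.lt_of_succ_lt_succ h)]
        cases hs : split1 rest with
        | nil => exact absurd hs (split1_ne_nil rest)
        | cons a b => simp [split1, hs]
      · have hpre : List.isPrefixOf ['/'] (c :: rest) = false := by
          simp [List.isPrefixOf]; exact fun hh => hc hh.symm
        simp only [hpre]
        rw [ih rest (c :: cur) acc (by simpa using Nat.lt_of_succ_lt_succ h)]
        cases hs : split1 rest with
        | nil => exact absurd hs (split1_ne_nil rest)
        | cons a b => simp [split1, hc, hs]

theorem splitOn_eq_split1 (s : List Char) :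
    PySem.Chars.splitOn s ['/'] = split1 s := by
  rw [PySem.Chars.splitOn, splitOn_go_eq _ _ _ _ (by omega)]
  cases hs : split1 s with
  | nil => exact absurd hs (split1_ne_nil s)
  | cons a b => simp

-- Inverse of split1: rejoin the pieces with '/'.
def join1 : List (List Char) → List Char
  | [] => []
  | [x] => x
  | x :: y :: r => x ++ '/' :: join1 (y :: r)

theorem join1_split1 (s : List Char) : join1 (split1 s) = s := by
  induction s with
  | nil => simp [split1, join1]
  | cons c t ih =>
    simp only [split1]
    split_ifs with hc
    · subst hc
      cases ht : split1 t with
      | nil => exact absurd ht (split1_ne_nil t)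
      | cons a b => rw [ht] at ih; simp [join1, ih]
    · cases ht : split1 t with
      | nil => exact absurd ht (split1_ne_nil t)
      | cons a b =>
        rw [ht] at ih
        cases b with
        | nil => simpa [join1] using congrArg (c :: ·) ih
        | cons a2 b2 => simpa [join1] using congrArg (c :: ·) ih

theorem split1_seg_append (seg r : List Char) (h : '/' ∉ seg) :
    split1 (seg ++ '/' :: r) = seg :: split1 r := by
  induction seg with
  | nil => simp [split1]
  | cons c t ih =>
    have hc : c ≠ '/' := fun hh => h (hh ▸ List.mem_cons_self ..)
    have ht : '/' ∉ t := fun hh => h (List.mem_cons_of_mem _ hh)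
    simp [split1, hc, ih ht]

-- Central characterization: prefix by a slash-free known segment ↔ shape of the split.
theorem key_iff (s seg : List Char) (hseg : '/' ∉ seg) :
    ('/' :: seg ++ ['/']) <+: s ↔ ∃ c rest, split1 s = [] :: seg :: c :: rest := by
  constructor
  · rintro ⟨r, rfl⟩
    have : ('/' :: seg ++ ['/']) ++ r = '/' :: (seg ++ '/' :: r) := by simp
    rw [this]
    have : split1 ('/' :: (seg ++ '/' :: r)) = [] :: seg :: split1 r := by
      simp [split1, split1_seg_append seg r hseg]
    cases hr : split1 r with
    | nil => exact absurd hr (split1_ne_nil r)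
    | cons a b => exact ⟨a, b, by rw [this, hr]⟩
  · rintro ⟨c, rest, h⟩
    have hj := join1_split1 s
    rw [h] at hj
    refine ⟨join1 (c :: rest), ?_⟩
    rw [← hj]
    simp [join1]

theorem key_back (s p1 c : List Char) (rest : List (List Char))
    (h : split1 s = [] :: p1 :: c :: rest) : ('/' :: p1 ++ ['/']) <+: s := by
  have hj := join1_split1 s
  rw [h] at hj
  refine ⟨join1 (c :: rest), ?_⟩
  rw [← hj]
  simp [join1]

theorem ofList_pvKnown : PySem.Set.ofList pvKnown = pvKnown := by decide

theorem pvKnown_shape : ∀ k ∈ pvKnown, k.head? = some '/' ∧ '/' ∉ k.tail := by decide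

theorem normAB (s : List Char) : pvNormA s = pvNormB s := by
  unfold pvNormA pvNormB
  by_cases hm : PySem.Set.contains (PySem.Set.ofList pvKnown) s = true
  · have hmem : s ∈ pvKnown := by
      rw [ofList_pvKnown] at hm; exact List.contains_iff_mem.mp hm
    simp [hmem]
  · simp only [Bool.not_eq_true] at hm
    simp only [hm, Bool.false_eq_true, if_false]
    rcases hfind : List.find? (fun k => PySem.Chars.startswith s (k ++ ['/'])) (PySem.Set.ofList pvKnown) with _ | k
    · -- no known endpoint is a slash-terminated prefix of s
      rw [List.find?_eq_none] at hfind
      rw [splitOn_eq_split1]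
      by_cases hlen : 1 < (split1 s).length
      · simp only [hlen, if_true]
        have hcond : ¬ ((PySem.List.pyGet? (split1 s) 0).getD [] = [] ∧
            PySem.Set.contains (PySem.Set.ofList pvKnown) ('/' :: (PySem.List.pyGet? (split1 s) 1).getD []) = true ∧
            2 < (split1 s).length) := by
          rintro ⟨h0, hmem, h2⟩
          match hsp : split1 s, h2 with
          | p0 :: p1 :: c :: rest, _ =>
            rw [hsp] at h0 hmem
            simp [PySem.List.pyGet?, PySem.List.pyIdx?] at h0
            subst h0
            have hp := key_back s p1 c rest hsp
            have : ('/' :: p1) ∈ PySem.Set.ofList pvKnown := by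
              rw [ofList_pvKnown] at hmem ⊢
              exact List.contains_iff_mem.mp (by simpa [PySem.Set.contains, PySem.List.pyGet?, PySem.List.pyIdx?, hsp] using hmem)
            have := hfind _ this
            simp [PySem.Chars.startswith_iff] at this
            exact this (by simpa using hp)
        simp only [hcond, if_false]
      · simp [hlen]
    · -- the first matching known endpoint k; the split must start with [], k's segment
      have hsw := List.find?_some hfind
      have hkmem : k ∈ PySem.Set.ofList pvKnown := List.mem_of_find?_eq_some hfind
      rw [ofList_pvKnown] at hkmem
      obtain ⟨hhead, htail⟩ := pvKnown_shape k hkmem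
      obtain ⟨seg, hk⟩ : ∃ seg, k = '/' :: seg ∧ '/' ∉ seg := by
        cases k with
        | nil => simp at hhead
        | cons a t => simp_all
      obtain ⟨hk, hseg⟩ := hk
      subst hk
      rw [PySem.Chars.startswith_iff] at hsw
      obtain ⟨c, rest, hsp⟩ := (key_iff s seg hseg).mp (by simpa using hsw)
      rw [splitOn_eq_split1, hsp]
      have h1 : (0:Int) ≤ (rest.length:Int) + 1 := by positivity
      have h2 : (0:Int) ≤ (rest.length:Int) + 1 + 1 := by positivity
      simp [PySem.List.pyGet?, PySem.List.pyIdx?, h1, h2, hkmem]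

-- ===== VERDICT (by name: the statement is the Claim_ definition above) =====
theorem normalize_endpoint_py_spec : Claim_equal_normalize_endpoint_py := by
  intro endpoint _
  unfold Spec_normalize_endpoint_py normalize_endpoint_py normalize_endpoint_py_alt
  rw [normAB]
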